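-- pv_equiv track=rewrite | github.com/jiaola/usaco | guide/backforth/backforth.py | pour
-- ===== SOURCE A (Python) =====
-- def pour(day, a, first, second, lst):
--     if day == 5:
--         lst.append(a)
--     else:
--         if day == 1 or day == 3:  # Tuesday or Thursday
--             for i in range(len(first)):
--                 first_copy = first.copy()
--                 second_copy = second.copy()
--                 bucket = first_copy.pop(i)
--                 second_copy.append(bucket)
--                 lst = pour(day+1, a + bucket, first_copy, second_copy, lst)
--         elif day == 2 or day == 4:  # Wed or Fri
--             for i in range(len(second)):
--                 first_copy = first.copy()
--                 second_copy = second.copy()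
--                 bucket = second_copy.pop(i)
--                 first_copy.append(bucket)
--                 lst = pour(day + 1, a - bucket, first_copy, second_copy, lst)
--     return lst
-- ===== SOURCE B (Python) =====
-- def pour(day, a, first, second, lst):
--     # Level-by-level (BFS) expansion instead of recursive DFS; leaf order is
--     # identical because every path has uniform depth.  Appends results to lst.
--     states = [(a, first, second)]
--     d = day
--     while states and d != 5:
--         if d == 1 or d == 3:
--             states = [(x + f[i], f[:i] + f[i + 1:], s + [f[i]])
--                       for (x, f, s) in states for i in range(len(f))]
--         elif d == 2 or d == 4:
--             states = [(x - s[i], f + [s[i]], s[:i] + s[i + 1:])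
--                       for (x, f, s) in states for i in range(len(s))]
--         else:
--             states = []
--         d += 1
--     lst.extend(x for (x, _, _) in states)
--     return lst
-- ===== Notes on version B (the rewrite author's own statement) =====
-- stated objective: alternative
-- what changed: Replaced the recursive DFS (which recurses once per bucket at each of the four days) by an iterative level-by-level (BFS) expansion of a worklist of (amount, first, second) states, appending the surviving amounts at day 5; the leaf order is identical because all paths have uniform depth.
import Mathlib
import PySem

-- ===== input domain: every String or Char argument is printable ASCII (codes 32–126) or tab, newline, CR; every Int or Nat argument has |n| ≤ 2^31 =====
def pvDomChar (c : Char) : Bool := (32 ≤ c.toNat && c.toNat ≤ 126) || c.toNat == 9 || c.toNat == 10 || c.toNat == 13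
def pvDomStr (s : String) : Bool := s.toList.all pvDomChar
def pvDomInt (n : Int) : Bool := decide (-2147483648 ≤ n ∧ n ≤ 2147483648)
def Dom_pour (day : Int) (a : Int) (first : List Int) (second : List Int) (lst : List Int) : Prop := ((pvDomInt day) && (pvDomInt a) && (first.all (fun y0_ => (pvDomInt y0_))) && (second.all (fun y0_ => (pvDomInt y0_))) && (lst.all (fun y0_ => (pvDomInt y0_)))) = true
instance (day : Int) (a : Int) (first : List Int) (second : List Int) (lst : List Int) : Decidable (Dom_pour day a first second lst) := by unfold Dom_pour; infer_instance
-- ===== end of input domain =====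

-- B replaces A's recursive DFS by an iterative level-by-level expansion of a state worklist
-- (objective: alternative decomposition, same cost).  Python A and B both append to the caller's
-- lst in place; the theorems here are about the returned value.

-- ===== PORT A =====
-- Literal port of A's recursive DFS.  range(len(first)) with its nonnegative bound is List.range;
-- first_copy.pop(i) is PySem.List.pop? (the 'none' arm is unreachable since i < length, Python never raises here).
def pour (day : Int) (a : Int) (first : List Int) (second : List Int) (lst : List Int) : List Int :=
  if day = 5 then lst ++ [a]
  else if _h13 : day = 1 ∨ day = 3 then
    (List.range first.length).foldl (fun l (i : Nat) =>
      match PySem.List.pop? first (i : Int) with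
      | some (bucket, first_copy) =>
          pour (day + 1) (a + bucket) first_copy (second ++ [bucket]) l
      | none => l) lst
  else if _h24 : day = 2 ∨ day = 4 then
    (List.range second.length).foldl (fun l (i : Nat) =>
      match PySem.List.pop? second (i : Int) with
      | some (bucket, second_copy) =>
          pour (day + 1) (a - bucket) (first ++ [bucket]) second_copy l
      | none => l) lst
  else lst
termination_by (5 - day).toNat
decreasing_by
  · omega
  · omega

-- ===== PORT B =====
-- One expansion step of B's worklist: a state is (x, first, second);
-- f[i] is PySem.List.pyGetD (i in range, Python never raises here),
-- f[:i] and f[i+1:] are PySem.List.slice.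
def pourExpand (d : Int) (states : List (Int × List Int × List Int)) : List (Int × List Int × List Int) :=
  if d = 1 ∨ d = 3 then
    states.flatMap (fun t => (List.range t.2.1.length).map (fun (i : Nat) =>
      (t.1 + PySem.List.pyGetD t.2.1 (i : Int) 0,
       PySem.List.slice t.2.1 none (some (i : Int)) ++ PySem.List.slice t.2.1 (some ((i : Int) + 1)) none,
       t.2.2 ++ [PySem.List.pyGetD t.2.1 (i : Int) 0])))
  else if d = 2 ∨ d = 4 then
    states.flatMap (fun t => (List.range t.2.2.length).map (fun (i : Nat) =>
      (t.1 - PySem.List.pyGetD t.2.2 (i : Int) 0,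
       t.2.1 ++ [PySem.List.pyGetD t.2.2 (i : Int) 0],
       PySem.List.slice t.2.2 none (some (i : Int)) ++ PySem.List.slice t.2.2 (some ((i : Int) + 1)) none)))
  else []

-- cited by pourLoop's decreasing_by: a nonempty expansion only happens on days 1–4
theorem pourExpand_ne_nil_day (d : Int) (states : List (Int × List Int × List Int))
    (h : pourExpand d states ≠ []) : d = 1 ∨ d = 2 ∨ d = 3 ∨ d = 4 := by
  unfold pourExpand at h
  split at h
  · omega
  · split at h
    · omega
    · exact absurd rfl h

-- B's while loop: pop nothing, expand the whole level, stop when no states remain or d == 5.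
def pourLoop (states : List (Int × List Int × List Int)) (d : Int) : List Int :=
  if h : states ≠ [] ∧ d ≠ 5 then pourLoop (pourExpand d states) (d + 1)
  else states.map (fun t => t.1)
termination_by if states = [] then 0 else (5 - d).toNat + 1
decreasing_by
  by_cases he : pourExpand d states = []
  · simp [he, h.1]
  · have hd := pourExpand_ne_nil_day d states he
    rw [if_neg he, if_neg h.1]
    omega

def pour_alt (day : Int) (a : Int) (first : List Int) (second : List Int) (lst : List Int) : List Int :=
  lst ++ pourLoop [(a, first, second)] day

-- ===== PRECONDITION & SPEC =====
def Spec_pour (day : Int) (a : Int) (first : List Int) (second : List Int) (lst : List Int) (out : List Int) : Prop := out = pour_alt day a first second lst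
instance (day : Int) (a : Int) (first : List Int) (second : List Int) (lst : List Int) (out : List Int) : Decidable (Spec_pour day a first second lst out) := by unfold Spec_pour; infer_instance

-- ===== CLAIM (what is proved, stated in full; the proofs are below) =====
def Claim_equal_pour : Prop := ∀ (day : Int) (a : Int) (first : List Int) (second : List Int) (lst : List Int), Dom_pour day a first second lst → Spec_pour day a first second lst (pour day a first second lst)

-- ===== LEMMAS AND PROOFS =====

-- DFS over a whole worklist, in A's terms
def pourAll (d : Int) (states : List (Int × List Int × List Int)) (lst : List Int) : List Int :=
  states.foldl (fun l t => pour d t.1 t.2.1 t.2.2 l) lst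

theorem pour_invalid (day a : Int) (first second lst : List Int)
    (h5 : day ≠ 5) (h13 : ¬ (day = 1 ∨ day = 3)) (h24 : ¬ (day = 2 ∨ day = 4)) :
    pour day a first second lst = lst := by
  unfold pour; simp [h5, h13, h24]

theorem pour_day5 (a : Int) (first second lst : List Int) :
    pour 5 a first second lst = lst ++ [a] := by
  unfold pour; simp

-- a single DFS node on day 1/3 equals the fold of pour (d+1) over its expanded children
theorem pour_step13 (d x : Int) (f s lst : List Int) (h : d = 1 ∨ d = 3) :
    pour d x f s lst =
      ((List.range f.length).map (fun (i : Nat) =>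
        (x + PySem.List.pyGetD f (i : Int) 0,
         PySem.List.slice f none (some (i : Int)) ++ PySem.List.slice f (some ((i : Int) + 1)) none,
         s ++ [PySem.List.pyGetD f (i : Int) 0]))).foldl
        (fun l t => pour (d + 1) t.1 t.2.1 t.2.2 l) lst := by
  have h5 : d ≠ 5 := by omega
  rw [List.foldl_map]
  conv_lhs => rw [pour]
  simp only [if_neg h5, dif_pos h]
  apply PySem.List.foldl_congr_mem
  intro l i hi
  have hlt : i < f.length := by simpa using hi
  rw [PySem.List.pop?_natCast f i hlt,
      show ((i : Int) + 1) = (((i + 1 : Nat)) : Int) by push_cast; ring,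
      PySem.List.slice_from_natCast, PySem.List.slice_to_natCast]
  simp [PySem.List.pyGetD_natCast, hlt, List.eraseIdx_eq_take_drop_succ]

theorem pour_step24 (d x : Int) (f s lst : List Int) (h24 : d = 2 ∨ d = 4) :
    pour d x f s lst =
      ((List.range s.length).map (fun (i : Nat) =>
        (x - PySem.List.pyGetD s (i : Int) 0,
         f ++ [PySem.List.pyGetD s (i : Int) 0],
         PySem.List.slice s none (some (i : Int)) ++ PySem.List.slice s (some ((i : Int) + 1)) none))).foldl
        (fun l t => pour (d + 1) t.1 t.2.1 t.2.2 l) lst := by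
  have h5 : d ≠ 5 := by omega
  have h13 : ¬ (d = 1 ∨ d = 3) := by omega
  rw [List.foldl_map]
  conv_lhs => rw [pour]
  simp only [if_neg h5, dif_neg h13, dif_pos h24]
  apply PySem.List.foldl_congr_mem
  intro l i hi
  have hlt : i < s.length := by simpa using hi
  rw [PySem.List.pop?_natCast s i hlt,
      show ((i : Int) + 1) = (((i + 1 : Nat)) : Int) by push_cast; ring,
      PySem.List.slice_from_natCast, PySem.List.slice_to_natCast]
  simp [PySem.List.pyGetD_natCast, hlt, List.eraseIdx_eq_take_drop_succ]

-- one DFS level over a worklist equals DFS of the next level over the expanded worklist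
theorem pourAll_step (d : Int) (h5 : d ≠ 5) (states : List (Int × List Int × List Int))
    (lst : List Int) :
    pourAll d states lst = pourAll (d + 1) (pourExpand d states) lst := by
  induction states generalizing lst with
  | nil =>
    unfold pourExpand
    split
    · simp [pourAll]
    · split <;> simp [pourAll]
  | cons t rest ih =>
    by_cases h13 : d = 1 ∨ d = 3
    · simp only [pourAll, pourExpand, if_pos h13, List.flatMap_cons, List.foldl_cons,
        List.foldl_append] at *
      rw [pour_step13 d t.1 t.2.1 t.2.2 lst h13, ih]
    · by_cases h24 : d = 2 ∨ d = 4
      · simp only [pourAll, pourExpand, if_pos h24, if_neg h13, List.flatMap_cons,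
          List.foldl_cons, List.foldl_append] at *
        rw [pour_step24 d t.1 t.2.1 t.2.2 lst h24, ih]
      · simp only [pourAll, List.foldl_cons]
        rw [pour_invalid d t.1 t.2.1 t.2.2 lst h5 h13 h24]
        have hrest := ih lst
        simp only [pourAll] at hrest
        rw [hrest]
        simp [pourExpand, if_neg h13, if_neg h24]

-- main invariant: DFS over a worklist = lst ++ result of B's level loop
theorem pourAll_eq_pourLoop (states : List (Int × List Int × List Int)) (d : Int) :
    ∀ lst : List Int, pourAll d states lst = lst ++ pourLoop states d := by
  induction states, d using pourLoop.induct with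
  | case1 states d h ih =>
    intro lst
    have hrw : pourLoop states d = pourLoop (pourExpand d states) (d + 1) := by
      conv_lhs => rw [pourLoop]
      rw [dif_pos h]
    rw [pourAll_step d h.2 states lst, ih lst, hrw]
  | case2 states d h =>
    intro lst
    rw [pourLoop]
    simp only [dif_neg h]
    rcases not_and_or.mp h with h | h
    · have : states = [] := not_not.mp h
      simp [this, pourAll]
    · have hd : d = 5 := not_not.mp h
      subst hd
      induction states generalizing lst with
      | nil => simp [pourAll]
      | cons t rest ih2 =>
        simp only [pourAll, List.foldl_cons, List.map_cons] at *
        rw [pour_day5 t.1 t.2.1 t.2.2 lst]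
        have hne : ¬(rest ≠ [] ∧ (5:Int) ≠ 5) := by simp
        have hr := ih2 (lst ++ [t.1]) hne
        rw [hr, List.append_assoc]
        rfl

-- ===== VERDICT (by name: the statement is the Claim_ definition above) =====
theorem pour_spec : Claim_equal_pour := by
  intro day a first second lst _
  show pour day a first second lst = pour_alt day a first second lst
  have := pourAll_eq_pourLoop [(a, first, second)] day lst
  simpa [pourAll, pour_alt] using this
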